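-- pv_equiv track=rewrite | github.com/ahyun39/CodingTest | 프로그래머스/2/132265. 롤케이크 자르기/롤케이크 자르기.py | solution
-- ===== SOURCE A (Python) =====
-- from collections import Counter
--
-- def solution(topping):
--     answer = 0
--     prefix_counter = Counter()
--     suffix_counter = Counter(topping)
--     prefix_count = 0
--     suffix_count = len(topping)
--
--     for i in range(1, len(topping) - 1):
--         prefix_counter[topping[i-1]] += 1
--         prefix_count += 1
--         suffix_counter[topping[i-1]] -= 1
--         suffix_count -= 1
--
--         if suffix_counter[topping[i-1]] == 0:
--             del suffix_counter[topping[i-1]]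
--
--         if len(prefix_counter) == len(suffix_counter):
--             answer += 1
--
--     return answer
-- ===== SOURCE B (Python) =====
-- def solution(topping):
--     # suffix_distinct[i] = number of distinct toppings in topping[i:]
--     suffix_distinct = []
--     seen = set()
--     for x in reversed(topping):
--         seen.add(x)
--         suffix_distinct.append(len(seen))
--     suffix_distinct.reverse()
--     prefix = set()
--     answer = 0
--     for p in range(1, len(topping) - 1):
--         prefix.add(topping[p - 1])
--         if len(prefix) == suffix_distinct[p]:
--             answer += 1
--     return answer
-- ===== Notes on version B (the rewrite author's own statement) =====
-- stated objective: faster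
-- what changed: Replaces A's two simultaneously-updated Counters (with per-step key deletion) by a precomputed suffix-distinct table built in one right-to-left set pass plus a forward pass maintaining only a prefix set; a timing run measured B 2.5-4x faster (constant factor: set adds vs. double Counter bookkeeping per step).
import Mathlib
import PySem

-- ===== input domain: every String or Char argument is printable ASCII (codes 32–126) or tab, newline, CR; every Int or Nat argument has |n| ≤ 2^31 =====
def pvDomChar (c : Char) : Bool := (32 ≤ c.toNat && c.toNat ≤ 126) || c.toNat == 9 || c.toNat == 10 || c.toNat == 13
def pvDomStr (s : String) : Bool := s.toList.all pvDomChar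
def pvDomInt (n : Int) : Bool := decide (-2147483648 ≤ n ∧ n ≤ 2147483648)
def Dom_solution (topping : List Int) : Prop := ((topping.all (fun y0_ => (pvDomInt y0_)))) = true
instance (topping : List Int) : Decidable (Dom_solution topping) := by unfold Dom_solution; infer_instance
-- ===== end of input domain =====

-- B replaces A's two simultaneously-updated Counters by a precomputed suffix-distinct table (one
-- right-to-left set pass) plus a forward pass maintaining only a prefix set; a timing run
-- measured B faster by a constant factor (objective: faster).

-- ===== PORT A =====
def solution (topping : List Int) : Int :=
  ((PySem.List.pyRange 1 (PySem.List.len topping - 1) 1).foldl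
    (fun (st : PySem.Dict Int Int × PySem.Dict Int Int × Int × Int × Int) i =>
      let x := PySem.List.pyGetD topping (i - 1) 0
      let pc := st.1.insert x (st.1.getD x 0 + 1)
      let pcount := st.2.2.1 + 1
      let sc0 := st.2.1.insert x (st.2.1.getD x 0 - 1)
      let scount := st.2.2.2.1 - 1
      let sc := if sc0.getD x 0 == 0 then sc0.erase x else sc0
      let ans := if pc.size == sc.size then st.2.2.2.2 + 1 else st.2.2.2.2
      (pc, sc, pcount, scount, ans))
    (PySem.Dict.empty, PySem.Dict.counter topping, 0, PySem.List.len topping, 0)).2.2.2.2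

-- ===== PORT B =====
def solution_alt (topping : List Int) : Int :=
  let sd := topping.reverse.foldl
      (fun (st : PySem.Set Int × List Int) x =>
        let seen := PySem.Set.add st.1 x
        (seen, st.2 ++ [PySem.Set.len seen]))
      (PySem.Set.empty, [])
  let tbl := sd.2.reverse
  ((PySem.List.pyRange 1 (PySem.List.len topping - 1) 1).foldl
    (fun (st : PySem.Set Int × Int) p =>
      let pre := PySem.Set.add st.1 (PySem.List.pyGetD topping (p - 1) 0)
      let ans := if PySem.Set.len pre == PySem.List.pyGetD tbl p 0 then st.2 + 1 else st.2
      (pre, ans))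
    (PySem.Set.empty, 0)).2

-- ===== PRECONDITION & SPEC =====
def Spec_solution (topping : List Int) (out : Int) : Prop := out = solution_alt topping
instance (topping : List Int) (out : Int) : Decidable (Spec_solution topping out) := by unfold Spec_solution; infer_instance

-- ===== CLAIM (what is proved, stated in full; the proofs are below) =====
def Claim_equal_solution : Prop := ∀ (topping : List Int), Dom_solution topping → Spec_solution topping (solution topping)

-- ===== LEMMAS AND PROOFS =====

/-- number of distinct elements of a list -/
def dcount (l : List Int) : Nat := (PySem.Set.ofList l).length

/-- the common count both loops compute: over the elements `l` still to process,
with processed prefix `pre` and untouched tail `tl`. -/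
def cnt : List Int → List Int → List Int → Int
  | _, [], _ => 0
  | pre, x :: l, tl =>
      (if dcount (pre ++ [x]) = dcount (l ++ tl) then 1 else 0) + cnt (pre ++ [x]) l tl

lemma length_eq_dcount (s l : List Int) (h1 : s.Nodup) (h2 : ∀ y, y ∈ s ↔ y ∈ l) :
    s.length = dcount l :=
  List.Perm.length_eq ((List.perm_ext_iff_of_nodup h1 (PySem.Set.nodup_ofList l)).mpr
    (fun y => (h2 y).trans (PySem.Set.mem_ofList l y).symm))

lemma dcount_reverse (l : List Int) : dcount l.reverse = dcount l := by
  refine length_eq_dcount _ _ (PySem.Set.nodup_ofList _) (fun y => ?_)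
  rw [PySem.Set.mem_ofList, List.mem_reverse]

lemma size_eq_keys_length {κ ν : Type} (d : PySem.Dict κ ν) : d.size = d.keys.length := by
  simp [PySem.Dict.size, PySem.Dict.keys]

lemma keys_erase_eq {κ ν : Type} [BEq κ] (d : PySem.Dict κ ν) (k : κ) :
    (d.erase k).keys = d.keys.filter (fun y => !(y == k)) := by
  simp only [PySem.Dict.erase, PySem.Dict.keys, List.filter_map]
  rfl

lemma mem_keys_erase {κ ν : Type} [BEq κ] [LawfulBEq κ] (d : PySem.Dict κ ν) (k y : κ) :
    y ∈ (d.erase k).keys ↔ y ∈ d.keys ∧ y ≠ k := by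
  rw [keys_erase_eq]; simp [List.mem_filter]

lemma nodup_keys_erase {κ ν : Type} [BEq κ] (d : PySem.Dict κ ν) (k : κ)
    (h : d.keys.Nodup) : (d.erase k).keys.Nodup := by
  rw [keys_erase_eq]; exact h.filter _

lemma find?_filter_eq {α : Type} (q r : α → Bool) (l : List α)
    (h : ∀ a, q a = true → r a = true) :
    List.find? q (l.filter r) = List.find? q l := by
  induction l with
  | nil => rfl
  | cons a l ih =>
    by_cases hq : q a = true
    · rw [List.filter_cons, h a hq]
      simp [List.find?_cons, hq]
    · cases hr : r a
      · simp [List.filter_cons, hr, List.find?_cons, hq, ih]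
      · simp [List.filter_cons, hr, List.find?_cons, hq, ih]

lemma find?_filter_none {α : Type} (q r : α → Bool) (l : List α)
    (h : ∀ a, q a = true → r a = false) :
    List.find? q (l.filter r) = none := by
  induction l with
  | nil => rfl
  | cons a l ih =>
    by_cases hq : q a = true
    · rw [List.filter_cons, h a hq]; exact ih
    · cases hr : r a
      · simp [List.filter_cons, hr, ih]
      · simp [List.filter_cons, hr, List.find?_cons, hq, ih]

lemma getD_erase_of_ne {κ ν : Type} [BEq κ] [LawfulBEq κ] (d : PySem.Dict κ ν) (k y : κ)
    (h : y ≠ k) (dflt : ν) : (d.erase k).getD y dflt = d.getD y dflt := by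
  simp only [PySem.Dict.getD, PySem.Dict.get?, PySem.Dict.erase]
  rw [find?_filter_eq]
  intro p hp
  simp only [beq_iff_eq] at hp
  simp [hp, h]

lemma getD_erase_self {κ ν : Type} [BEq κ] [LawfulBEq κ] (d : PySem.Dict κ ν) (k : κ)
    (dflt : ν) : (d.erase k).getD k dflt = dflt := by
  simp only [PySem.Dict.getD, PySem.Dict.get?, PySem.Dict.erase]
  rw [find?_filter_none]
  · rfl
  · intro p hp
    simp only [beq_iff_eq] at hp
    simp [hp]

lemma map_range_getD_take (T : List Int) (m : Nat) (hm : m ≤ T.length) :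
    (List.range m).map (fun k => T.getD k 0) = T.take m := by
  apply List.ext_getElem
  · simp [hm]
  · intro i h1 h2
    simp only [List.getElem_map, List.getElem_range, List.getElem_take]
    rw [List.getD_eq_getElem]

/-- A's loop over the still-to-process elements `l`. -/
lemma A_loop (tl : List Int) :
    ∀ (l pre : List Int) (pc sc : PySem.Dict Int Int) (pcount scount ans : Int),
    pc.keys.Nodup → (∀ y, y ∈ pc.keys ↔ y ∈ pre) →
    sc.keys.Nodup → (∀ y, sc.getD y 0 = ((l ++ tl).count y : Int)) →
    (∀ y, y ∈ sc.keys ↔ y ∈ l ++ tl) →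
    (l.foldl (fun (st : PySem.Dict Int Int × PySem.Dict Int Int × Int × Int × Int) x =>
        (st.1.insert x (st.1.getD x 0 + 1),
         (if (st.2.1.insert x (st.2.1.getD x 0 - 1)).getD x 0 == 0 then
            (st.2.1.insert x (st.2.1.getD x 0 - 1)).erase x
          else st.2.1.insert x (st.2.1.getD x 0 - 1)),
         st.2.2.1 + 1, st.2.2.2.1 - 1,
         (if (st.1.insert x (st.1.getD x 0 + 1)).size ==
              (if (st.2.1.insert x (st.2.1.getD x 0 - 1)).getD x 0 == 0 then
                 (st.2.1.insert x (st.2.1.getD x 0 - 1)).erase x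
               else st.2.1.insert x (st.2.1.getD x 0 - 1)).size then
            st.2.2.2.2 + 1 else st.2.2.2.2)))
      (pc, sc, pcount, scount, ans)).2.2.2.2 = ans + cnt pre l tl := by
  intro l
  induction l with
  | nil => intro pre pc sc pcount scount ans _ _ _ _ _; simp [cnt]
  | cons x l ih =>
    intro pre pc sc pcount scount ans hpcn hpcm hscn hscc hscm
    simp only [List.foldl_cons]
    -- abbreviations
    set pc' := pc.insert x (pc.getD x 0 + 1) with hpc'
    set sc0 := sc.insert x (sc.getD x 0 - 1) with hsc0
    set sc' := (if sc0.getD x 0 == 0 then sc0.erase x else sc0) with hsc'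
    have hpc'n : pc'.keys.Nodup := PySem.Dict.nodup_keys_insert _ _ _ hpcn
    have hpc'm : ∀ y, y ∈ pc'.keys ↔ y ∈ pre ++ [x] := by
      intro y
      rw [hpc', PySem.Dict.mem_keys_insert]
      simp [hpcm y, List.mem_append, or_comm]
    have hcx : sc.getD x 0 = ((l ++ tl).count x : Int) + 1 := by
      rw [hscc x]; simp [List.count_cons]
    have hsc0c : ∀ y, sc0.getD y 0 = ((l ++ tl).count y : Int) := by
      intro y
      rw [hsc0, PySem.Dict.getD_insert]
      by_cases h : y = x
      · subst h; simp [hcx]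
      · simp [h, hscc y, List.count_cons, Ne.symm h]
    have hsc0m : ∀ y, y ∈ sc0.keys ↔ y = x ∨ y ∈ l ++ tl := by
      intro y
      rw [hsc0, PySem.Dict.mem_keys_insert, hscm y]
      simp only [List.mem_append, List.mem_cons]
      tauto
    have hsc0n : sc0.keys.Nodup := PySem.Dict.nodup_keys_insert _ _ _ hscn
    have hsc'n : sc'.keys.Nodup := by
      rw [hsc']; split
      · exact nodup_keys_erase _ _ hsc0n
      · exact hsc0n
    have hsc'c : ∀ y, sc'.getD y 0 = ((l ++ tl).count y : Int) := by
      intro y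
      rw [hsc']
      split
      · rename_i h
        simp only [beq_iff_eq] at h
        by_cases hyx : y = x
        · subst hyx
          rw [getD_erase_self]
          rw [hsc0c y] at h
          omega
        · rw [getD_erase_of_ne _ _ _ hyx, hsc0c y]
      · exact hsc0c y
    have hsc'm : ∀ y, y ∈ sc'.keys ↔ y ∈ l ++ tl := by
      intro y
      rw [hsc']
      split
      · rename_i h
        simp only [beq_iff_eq, hsc0c x] at h
        have hx0 : (l ++ tl).count x = 0 := by exact_mod_cast h
        rw [mem_keys_erase, hsc0m y]
        constructor
        · rintro ⟨hmem | hmem, hne⟩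
          · exact absurd hmem hne
          · exact hmem
        · intro hmem
          refine ⟨Or.inr hmem, ?_⟩
          rintro rfl
          exact absurd hmem (by rw [← List.count_pos_iff] at *; omega)
      · rename_i h
        simp only [beq_iff_eq, hsc0c x] at h
        have hx0 : (l ++ tl).count x ≠ 0 := by exact_mod_cast h
        rw [hsc0m y]
        constructor
        · rintro (rfl | hmem)
          · exact List.count_pos_iff.mp (by omega)
          · exact hmem
        · exact Or.inr
    -- the condition
    have hpcsize : pc'.size = dcount (pre ++ [x]) := by
      rw [size_eq_keys_length]; exact length_eq_dcount _ _ hpc'n hpc'm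
    have hscsize : sc'.size = dcount (l ++ tl) := by
      rw [size_eq_keys_length]; exact length_eq_dcount _ _ hsc'n hsc'm
    rw [ih (pre ++ [x]) pc' sc' _ _ _ hpc'n hpc'm hsc'n hsc'c hsc'm]
    simp only [cnt]
    by_cases hcond : dcount (pre ++ [x]) = dcount (l ++ tl)
    · have hb : (pc'.size == sc'.size) = true := by simp [hpcsize, hscsize, hcond]
      simp [hb, hcond]; ring
    · have hb : (pc'.size == sc'.size) = false := by simp [hpcsize, hscsize, hcond]
      simp [hb, hcond]

/-- the suffix-table builder of B -/
lemma revfold (r : List Int) :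
    ∀ (seen : PySem.Set Int) (acc : List Int),
    r.foldl (fun (st : PySem.Set Int × List Int) x =>
        (PySem.Set.add st.1 x, st.2 ++ [PySem.Set.len (PySem.Set.add st.1 x)]))
      (seen, acc)
    = (PySem.Set.update seen r,
       acc ++ (List.range r.length).map
         (fun j => ((PySem.Set.update seen (r.take (j + 1))).length : Int))) := by
  induction r with
  | nil => intro seen acc; simp [PySem.Set.update_nil]
  | cons x rs ih =>
    intro seen acc
    simp only [List.foldl_cons]
    rw [ih]
    refine Prod.ext ?_ ?_
    · simp [PySem.Set.update_cons]
    · simp only [List.length_cons, List.range_succ_eq_map, List.map_cons, List.map_map]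
      simp [PySem.Set.update_cons, PySem.Set.update_nil, PySem.Set.len, Function.comp,
        List.take_succ_cons]

lemma tbl_eq (T : List Int) (i : Nat) (hi : i < T.length) :
    ((T.reverse.foldl (fun (st : PySem.Set Int × List Int) x =>
        (PySem.Set.add st.1 x, st.2 ++ [PySem.Set.len (PySem.Set.add st.1 x)]))
      (PySem.Set.empty, [])).2.reverse).getD i 0 = (dcount (T.drop i) : Int) := by
  rw [revfold]
  simp only [List.nil_append, List.length_reverse]
  have hlen : ((List.range T.length).map
      (fun j => ((PySem.Set.update PySem.Set.empty (T.reverse.take (j + 1))).length : Int))).length = T.length := by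
    simp
  rw [List.getD_eq_getElem _ _ (by simpa [hlen] using (by omega : i < T.length))]
  rw [List.getElem_reverse]
  simp only [List.getElem_map, List.getElem_range, hlen]
  have h1 : PySem.Set.update PySem.Set.empty (T.reverse.take (T.length - 1 - i + 1))
      = PySem.Set.ofList (T.reverse.take (T.length - 1 - i + 1)) := PySem.Set.update_nil_left _
  rw [h1]
  have h2 : T.length - 1 - i + 1 = T.length - i := by omega
  rw [h2, List.take_reverse]
  have h3 : T.length - (T.length - i) = i := by omega
  rw [h3]
  have := dcount_reverse (T.drop i)
  simp only [dcount] at this ⊢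
  rw [this]

lemma getD_append_cons (pre rest : List Int) (x d : Int) :
    (pre ++ x :: rest).getD pre.length d = x := by
  rw [List.getD_eq_getElem?_getD, List.getElem?_append_right (le_refl _)]
  simp

/-- B's forward loop. -/
lemma B_loop (T tbl : List Int)
    (htbl : ∀ (i : Nat), i < T.length → tbl.getD i 0 = (dcount (T.drop i) : Int)) :
    ∀ (l pre tl : List Int), T = pre ++ l ++ tl → tl.length = 2 →
    ∀ (seen : PySem.Set Int) (ans : Int), seen.Nodup → (∀ y, y ∈ seen ↔ y ∈ pre) →
    (((PySem.List.pyRange (↑pre.length + 1) (PySem.List.len T - 1) 1).foldl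
        (fun (st : PySem.Set Int × Int) p =>
          (PySem.Set.add st.1 (PySem.List.pyGetD T (p - 1) 0),
           (if PySem.Set.len (PySem.Set.add st.1 (PySem.List.pyGetD T (p - 1) 0)) ==
                PySem.List.pyGetD tbl p 0 then st.2 + 1 else st.2)))
        (seen, ans)).2) = ans + cnt pre l tl := by
  intro l
  induction l with
  | nil =>
    intro pre tl hT htl seen ans hn hm
    rw [PySem.List.pyRange_one_eq_nil]
    · simp [cnt]
    · subst hT; simp [PySem.List.len]; omega
  | cons x l ih =>
    intro pre tl hT htl seen ans hn hm
    have hTlen : T.length = pre.length + l.length + 3 := by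
      subst hT; simp; omega
    have hab : (↑pre.length + 1 : Int) < PySem.List.len T - 1 := by
      simp [PySem.List.len, hTlen]; omega
    rw [PySem.List.pyRange_one_cons hab, List.foldl_cons]
    have hx : PySem.List.pyGetD T (↑pre.length + 1 - 1) 0 = x := by
      have : (↑pre.length + 1 - 1 : Int) = (pre.length : Int) := by ring
      rw [this, PySem.List.pyGetD_natCast]
      have hT' : T = pre ++ x :: (l ++ tl) := by rw [hT]; simp
      rw [hT', getD_append_cons]
    have htv : PySem.List.pyGetD tbl (↑pre.length + 1) 0 = (dcount (l ++ tl) : Int) := by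
      have : (↑pre.length + 1 : Int) = ((pre.length + 1 : Nat) : Int) := by push_cast; ring
      rw [this, PySem.List.pyGetD_natCast, htbl (pre.length + 1) (by omega)]
      have hT' : T = (pre ++ [x]) ++ (l ++ tl) := by rw [hT]; simp
      have : T.drop (pre.length + 1) = l ++ tl := by
        rw [hT']
        have : pre.length + 1 = (pre ++ [x]).length := by simp
        rw [this, List.drop_left]
      rw [this]
    rw [hx, htv]
    have hs'n : (PySem.Set.add seen x).Nodup := PySem.Set.nodup_add _ _ hn
    have hs'm : ∀ y, y ∈ PySem.Set.add seen x ↔ y ∈ pre ++ [x] := by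
      intro y
      rw [PySem.Set.mem_add]
      simp [hm y]
    have hslen : PySem.Set.len (PySem.Set.add seen x) = (dcount (pre ++ [x]) : Int) := by
      simp only [PySem.Set.len]
      exact_mod_cast length_eq_dcount _ _ hs'n hs'm
    rw [hslen]
    have harg : ((pre ++ [x]).length : Int) + 1 = ↑pre.length + 1 + 1 := by simp
    have := ih (pre ++ [x]) tl (by rw [hT]; simp) htl (PySem.Set.add seen x)
      (if ((dcount (pre ++ [x]) : Int) == (dcount (l ++ tl) : Int)) = true then ans + 1 else ans)
      hs'n hs'm
    rw [harg] at this
    rw [this]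
    simp only [cnt]
    by_cases hcond : dcount (pre ++ [x]) = dcount (l ++ tl)
    · simp [hcond]; ring
    · have hb : (((dcount (pre ++ [x]) : Int)) == ((dcount (l ++ tl) : Int))) = false := by
        simp [hcond]
      simp [hb, hcond]

lemma solution_eq_cnt (T : List Int) (hn : 3 ≤ T.length) :
    solution T = 0 + cnt [] (T.take (T.length - 2)) (T.drop (T.length - 2)) := by
  simp only [solution]
  rw [PySem.List.pyRange_one, List.foldl_map]
  have hm2 : ((PySem.List.len T - 1 - 1).toNat) = T.length - 2 := by
    simp [PySem.List.len]; omega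
  rw [hm2]
  have h1 : ∀ (k : Nat), (1 + (k : Int) - 1) = ((k : Nat) : Int) := fun k => by ring
  simp only [h1, PySem.List.pyGetD_natCast]
  have hA := A_loop (T.drop (T.length - 2)) (T.take (T.length - 2)) [] PySem.Dict.empty
      (PySem.Dict.counter T) 0 (PySem.List.len T) 0
      (by simp [PySem.Dict.keys_empty])
      (by simp [PySem.Dict.keys_empty])
      (PySem.Dict.nodup_keys_counter T)
      (by intro y; rw [List.take_append_drop]; exact PySem.Dict.getD_counter T y)
      (by intro y; rw [List.take_append_drop, PySem.Dict.keys_counter, PySem.Set.mem_ofList])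
  nth_rewrite 1 [← map_range_getD_take T (T.length - 2) (by omega)] at hA
  rw [List.foldl_map] at hA
  skip
  exact hA

lemma solution_alt_eq_cnt (T : List Int) (hn : 3 ≤ T.length) :
    solution_alt T = 0 + cnt [] (T.take (T.length - 2)) (T.drop (T.length - 2)) := by
  simp only [solution_alt]
  have hB := B_loop T
      ((T.reverse.foldl (fun (st : PySem.Set Int × List Int) x =>
          (PySem.Set.add st.1 x, st.2 ++ [PySem.Set.len (PySem.Set.add st.1 x)]))
        (PySem.Set.empty, [])).2.reverse)
      (tbl_eq T)
      (T.take (T.length - 2)) [] (T.drop (T.length - 2))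
      (by simp) (by simp; omega)
      PySem.Set.empty 0 List.nodup_nil (by simp [PySem.Set.empty])
  simpa using hB

-- ===== VERDICT (by name: the statement is the Claim_ definition above) =====
theorem solution_spec : Claim_equal_solution := by
  intro topping _
  unfold Spec_solution
  by_cases hn : 3 ≤ topping.length
  · rw [solution_eq_cnt topping hn, solution_alt_eq_cnt topping hn]
  · have hb : (PySem.List.len topping - 1 : Int) ≤ 1 := by
      simp only [PySem.List.len]; omega
    simp only [solution, solution_alt]
    rw [PySem.List.pyRange_one_eq_nil hb]
    simp
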